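-- pv_equiv track=rewrite | github.com/lucascolley/cover-system | cover/includes/import/import.py | name_parse
-- ===== SOURCE A (Python) =====
-- def name_parse(timetable):
--     nameline = timetable[0]
--     nameline = nameline.strip(",\n")
--     nameline = nameline[12:]
--     title = ""
--     forename = ""
--     surname = ""
--     part = 0
--     for letter in nameline:
--         nameline = nameline[1:]
--         if letter == " ":
--             part += 1
--         else:
--             if part == 0:
--                 title += letter
--             elif part == 1:
--                 forename += letter
--             elif part == 2:
--                 surname += letter
--     return title, forename, surname
-- ===== SOURCE B (Python) =====
-- def name_parse(timetable):
--     nameline = timetable[0].strip(",\n")[12:]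
--     parts = nameline.split(" ") + ["", ""]
--     return parts[0], parts[1], parts[2]
-- ===== Notes on version B (the rewrite author's own statement) =====
-- stated objective: idiomatic
-- what changed: Replaces the manual character walk with a per-space part counter and three accumulator strings by a single str.split(' ') plus positional indexing into the padded part list.
import Mathlib
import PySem

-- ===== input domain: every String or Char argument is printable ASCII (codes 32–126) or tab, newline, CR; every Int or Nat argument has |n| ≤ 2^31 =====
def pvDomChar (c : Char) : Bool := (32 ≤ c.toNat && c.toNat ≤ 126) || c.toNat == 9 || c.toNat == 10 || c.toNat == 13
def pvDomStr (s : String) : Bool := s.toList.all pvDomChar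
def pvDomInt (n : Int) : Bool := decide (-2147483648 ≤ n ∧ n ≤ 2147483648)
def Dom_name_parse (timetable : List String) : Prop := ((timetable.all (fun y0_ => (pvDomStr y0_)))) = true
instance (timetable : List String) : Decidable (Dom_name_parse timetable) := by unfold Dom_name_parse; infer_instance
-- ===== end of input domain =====

-- B replaces A's manual character walk (space counter feeding three accumulator strings)
-- by one split(" ") plus positional indexing into the padded part list; objective: idiomatic.

-- ===== PORT A =====
def name_parse (timetable : List String) : String × String × String :=
  match PySem.List.pyGet? timetable 0 with
  | none => ("", "", "")
  | some nameline0 =>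
    let nameline1 := PySem.Str.stripChars nameline0 ",\n"
    let nameline2 := PySem.Str.slice nameline1 (some 12) none
    let st := nameline2.toList.foldl
      (fun (st : String × String × String × String × Int) letter =>
        let (nameline, title, forename, surname, part) := st
        let nameline := PySem.Str.slice nameline (some 1) none
        if letter = ' ' then (nameline, title, forename, surname, part + 1)
        else if part = 0 then (nameline, title.push letter, forename, surname, part)
        else if part = 1 then (nameline, title, forename.push letter, surname, part)
        else if part = 2 then (nameline, title, forename, surname.push letter, part)
        else (nameline, title, forename, surname, part))
      (nameline2, "", "", "", 0)
    (st.2.1, st.2.2.1, st.2.2.2.1)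

-- ===== PORT B =====
def name_parse_alt (timetable : List String) : String × String × String :=
  match PySem.List.pyGet? timetable 0 with
  | none => ("", "", "")
  | some line =>
    let nameline := PySem.Str.slice (PySem.Str.stripChars line ",\n") (some 12) none
    let parts := (PySem.Str.split? nameline " ").getD [] ++ ["", ""]
    (parts.getD 0 "", parts.getD 1 "", parts.getD 2 "")

-- ===== PRECONDITION & SPEC =====
-- Both Pythons raise IndexError (timetable[0]) on an empty timetable; Pre_ excludes exactly that.
def Pre_name_parse (timetable : List String) : Prop := timetable ≠ []
instance (timetable : List String) : Decidable (Pre_name_parse timetable) := by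
  unfold Pre_name_parse; infer_instance
def pvWitness_name_parse : List String := ["Name of Usr:Mr John Smith"]

def Spec_name_parse (timetable : List String) (out : String × String × String) : Prop := out = name_parse_alt timetable
instance (timetable : List String) (out : String × String × String) : Decidable (Spec_name_parse timetable out) := by unfold Spec_name_parse; infer_instance

-- ===== CLAIM (what is proved, stated in full; the proofs are below) =====
def Claim_equal_name_parse : Prop := ∀ (timetable : List String), Dom_name_parse timetable → Pre_name_parse timetable → Spec_name_parse timetable (name_parse timetable)

-- ===== LEMMAS AND PROOFS =====

def spSplit : List Char → List (List Char)
  | [] => [[]]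
  | c :: rest => if c = ' ' then [] :: spSplit rest else (spSplit rest).modifyHead (c :: ·)

theorem spSplit_ne_nil (l : List Char) : spSplit l ≠ [] := by
  cases l with
  | nil => simp [spSplit]
  | cons c rest =>
    simp only [spSplit]
    split
    · simp
    · rcases h : spSplit rest with _ | ⟨a, t⟩
      · exact absurd h (spSplit_ne_nil rest)
      · simp

theorem modifyHead_id_fun (g : List (List Char)) : g.modifyHead (fun x => x) = g := by
  cases g <;> simp

theorem go_cons (fuel : Nat) (c : Char) (rest cur : List Char) (acc : List (List Char)) :
    PySem.Chars.splitOn.go [' '] (fuel+1) (c :: rest) cur acc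
      = if c = ' ' then PySem.Chars.splitOn.go [' '] fuel rest [] (cur.reverse :: acc)
        else PySem.Chars.splitOn.go [' '] fuel rest (c :: cur) acc := by
  rw [PySem.Chars.splitOn.go]
  by_cases hc : c = ' '
  · simp [List.isPrefixOf, hc]
  · simp [List.isPrefixOf, hc]
    intro h; exact absurd h.symm hc

theorem go_nil (fuel : Nat) (cur : List Char) (acc : List (List Char)) :
    PySem.Chars.splitOn.go [' '] (fuel+1) [] cur acc = (cur.reverse :: acc).reverse := by
  rw [PySem.Chars.splitOn.go]
  omega

theorem splitOn_go_space (fuel : Nat) (l cur : List Char) (acc : List (List Char))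
    (h : l.length ≤ fuel) :
    PySem.Chars.splitOn.go [' '] fuel l cur acc
      = acc.reverse ++ (spSplit l).modifyHead (cur.reverse ++ ·) := by
  induction l generalizing fuel cur acc with
  | nil =>
    cases fuel with
    | zero => rw [PySem.Chars.splitOn.go]; simp [spSplit]
    | succ fuel => rw [go_nil]; simp [spSplit]
  | cons c rest ih =>
    cases fuel with
    | zero => simp at h
    | succ fuel =>
      rw [go_cons]
      by_cases hc : c = ' '
      · subst hc
        rw [if_pos rfl, ih fuel [] _ (by simpa using h)]
        simp [spSplit, modifyHead_id_fun]
      · rw [if_neg hc, ih fuel (c :: cur) acc (by simpa using h)]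
        simp only [spSplit, if_neg hc]
        rcases hsp : spSplit rest with _ | ⟨a, t⟩
        · exact absurd hsp (spSplit_ne_nil rest)
        · simp

theorem splitOn_eq_spSplit (l : List Char) :
    PySem.Chars.splitOn l [' '] = spSplit l := by
  unfold PySem.Chars.splitOn
  rw [splitOn_go_space _ _ _ _ (by omega)]
  rcases hsp : spSplit l with _ | ⟨a, t⟩
  · exact absurd hsp (spSplit_ne_nil l)
  · simp

def stepA (st : String × String × String × String × Int) (letter : Char) :
    String × String × String × String × Int :=
  let (nameline, title, forename, surname, part) := st
  let nameline := PySem.Str.slice nameline (some 1) none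
  if letter = ' ' then (nameline, title, forename, surname, part + 1)
  else if part = 0 then (nameline, title.push letter, forename, surname, part)
  else if part = 1 then (nameline, title, forename.push letter, surname, part)
  else if part = 2 then (nameline, title, forename, surname.push letter, part)
  else (nameline, title, forename, surname, part)

def selGroup (l : List Char) (p i : Nat) : List Char :=
  if p ≤ i then (spSplit l).getD (i - p) [] else []

theorem selGroup_space (rest : List Char) (p i : Nat) :
    selGroup (' ' :: rest) p i = selGroup rest (p + 1) i := by
  unfold selGroup
  simp only [spSplit, if_pos rfl]
  by_cases h1 : p + 1 ≤ i
  · rw [if_pos (by omega), if_pos h1]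
    have : i - p = (i - (p+1)) + 1 := by omega
    rw [this]; simp [List.getD]
  · rw [if_neg h1]
    by_cases h2 : p ≤ i
    · have : i - p = 0 := by omega
      rw [if_pos h2, this]; simp [List.getD]
    · rw [if_neg h2]

theorem spSplit_char (c : Char) (rest : List Char) (hc : ¬ c = ' ') :
    spSplit (c :: rest) = (spSplit rest).modifyHead (c :: ·) := by
  simp [spSplit, hc]

theorem selGroup_char_eq (c : Char) (rest : List Char) (hc : ¬ c = ' ') (p : Nat) :
    selGroup (c :: rest) p p = c :: selGroup rest p p := by
  unfold selGroup
  rw [spSplit_char c rest hc, if_pos le_rfl, if_pos le_rfl, Nat.sub_self]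
  rcases h : spSplit rest with _ | ⟨a, t⟩
  · exact absurd h (spSplit_ne_nil rest)
  · simp [List.getD]

theorem selGroup_char_ne (c : Char) (rest : List Char) (hc : ¬ c = ' ') (p i : Nat)
    (hpi : p ≠ i) : selGroup (c :: rest) p i = selGroup rest p i := by
  unfold selGroup
  rw [spSplit_char c rest hc]
  by_cases h1 : p ≤ i
  · rw [if_pos h1, if_pos h1]
    rcases h : spSplit rest with _ | ⟨a, t⟩
    · exact absurd h (spSplit_ne_nil rest)
    · have : ∃ k, i - p = k + 1 := ⟨i - p - 1, by omega⟩
      rcases this with ⟨k, hk⟩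
      simp [hk, List.getD]
  · rw [if_neg h1, if_neg h1]

theorem length_spSplit_space (rest : List Char) :
    (spSplit (' ' :: rest)).length = (spSplit rest).length + 1 := by
  simp [spSplit]

theorem length_spSplit_char (c : Char) (rest : List Char) (hc : ¬ c = ' ') :
    (spSplit (c :: rest)).length = (spSplit rest).length := by
  rw [spSplit_char c rest hc]; simp

theorem push_append_ofList (s : String) (c : Char) (x : List Char) :
    s.push c ++ String.ofList x = s ++ String.ofList (c :: x) := by
  apply String.toList_injective
  simp

theorem foldA_inv (l : List Char) (n t f s : String) (p : Nat) :
    l.foldl stepA (n, t, f, s, (p : Int))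
      = (l.foldl (fun m _ => PySem.Str.slice m (some 1) none) n,
         t ++ String.ofList (selGroup l p 0),
         f ++ String.ofList (selGroup l p 1),
         s ++ String.ofList (selGroup l p 2),
         (p : Int) + (spSplit l).length - 1) := by
  induction l generalizing n t f s p with
  | nil =>
    simp [selGroup, spSplit, List.getD]
  | cons c rest ih =>
    by_cases hc : c = ' '
    · subst hc
      have hstep : stepA (n, t, f, s, (p : Int)) ' '
          = (PySem.Str.slice n (some 1) none, t, f, s, (p : Int) + 1) := by
        simp [stepA]
      rw [List.foldl_cons, hstep]
      have hcast : (p : Int) + 1 = ((p + 1 : Nat) : Int) := by push_cast; ring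
      rw [hcast, ih]
      simp only [List.foldl_cons, selGroup_space, length_spSplit_space, Prod.mk.injEq]
      and_intros <;> first | trivial | (push_cast; ring)
    · have hch := selGroup_char_eq c rest hc
      have hcn := selGroup_char_ne c rest hc
      have hlen := length_spSplit_char c rest hc
      rcases p with _ | _ | _ | q
      · have hstep : stepA (n, t, f, s, ((0:Nat) : Int)) c
            = (PySem.Str.slice n (some 1) none, t.push c, f, s, ((0:Nat) : Int)) := by
          simp [stepA, hc]
        rw [List.foldl_cons, hstep, ih]
        simp only [List.foldl_cons, hch, hcn 0 1 (by omega), hcn 0 2 (by omega), hlen,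
          Prod.mk.injEq]
        and_intros <;> first | trivial | exact push_append_ofList _ c _
      · have hstep : stepA (n, t, f, s, ((1:Nat) : Int)) c
            = (PySem.Str.slice n (some 1) none, t, f.push c, s, ((1:Nat) : Int)) := by
          simp [stepA, hc]
        rw [List.foldl_cons, hstep, ih]
        simp only [List.foldl_cons, hch, hcn 1 0 (by omega), hcn 1 2 (by omega), hlen,
          Prod.mk.injEq]
        and_intros <;> first | trivial | exact push_append_ofList _ c _
      · have hstep : stepA (n, t, f, s, ((2:Nat) : Int)) c
            = (PySem.Str.slice n (some 1) none, t, f, s.push c, ((2:Nat) : Int)) := by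
          simp [stepA, hc]
        rw [List.foldl_cons, hstep, ih]
        simp only [List.foldl_cons, hch, hcn 2 0 (by omega), hcn 2 1 (by omega), hlen,
          Prod.mk.injEq]
        and_intros <;> first | trivial | exact push_append_ofList _ c _
      · have hstep : stepA (n, t, f, s, ((q+3:Nat) : Int)) c
            = (PySem.Str.slice n (some 1) none, t, f, s, ((q+3:Nat) : Int)) := by
          simp only [stepA]
          rw [if_neg (by simp [hc]), if_neg (by push_cast; omega),
            if_neg (by push_cast; omega), if_neg (by push_cast; omega)]
        rw [List.foldl_cons, hstep, ih]
        simp only [List.foldl_cons, hcn (q+3) 0 (by omega), hcn (q+3) 1 (by omega),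
          hcn (q+3) 2 (by omega), hlen, Prod.mk.injEq]
        all_goals and_intros <;> trivial

theorem pad_getD (g : List (List Char)) (hg : g ≠ []) (i : Nat) (hi : i ≤ 2) :
    ((g.map String.ofList) ++ ["", ""]).getD i "" = String.ofList (g.getD i []) := by
  have hnil : String.ofList ([] : List Char) = "" := rfl
  rcases g with _ | ⟨a, _ | ⟨b, _ | ⟨c, t⟩⟩⟩ <;> simp at hg <;> interval_cases i <;>
    simp [List.getD, hnil]

theorem name_parse_eq_alt (tt : List String) (h : tt ≠ []) : name_parse tt = name_parse_alt tt := by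
  rcases tt with _ | ⟨x, rest⟩
  · exact absurd rfl h
  · have hget : PySem.List.pyGet? (x :: rest) (0 : Int) = some x := by
      simp [PySem.List.pyGet?, PySem.List.pyIdx?]
    unfold name_parse name_parse_alt
    rw [hget]
    have hstep : (fun (st : String × String × String × String × Int) letter =>
        let (nameline, title, forename, surname, part) := st
        let nameline := PySem.Str.slice nameline (some 1) none
        if letter = ' ' then (nameline, title, forename, surname, part + 1)
        else if part = 0 then (nameline, title.push letter, forename, surname, part)
        else if part = 1 then (nameline, title, forename.push letter, surname, part)
        else if part = 2 then (nameline, title, forename, surname.push letter, part)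
        else (nameline, title, forename, surname, part)) = stepA := rfl
    simp only [hstep]
    set nl := PySem.Str.slice (PySem.Str.stripChars x ",\n") (some 12) none with hnl
    have h0 : (0 : Int) = ((0 : Nat) : Int) := rfl
    rw [h0, foldA_inv]
    have hsplit : PySem.Str.split? nl " " = some ((spSplit nl.toList).map String.ofList) := by
      show Option.map _ (PySem.Chars.split? nl.toList " ".toList) = _
      have : " ".toList = [' '] := rfl
      rw [this]
      simp [PySem.Chars.split?, splitOn_eq_spSplit]
    rw [hsplit]
    simp only [Option.getD_some]
    have hne := spSplit_ne_nil nl.toList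
    rw [pad_getD _ hne 0 (by omega), pad_getD _ hne 1 (by omega), pad_getD _ hne 2 (by omega)]
    simp [selGroup]

-- ===== VERDICT (by name: the statement is the Claim_ definition above) =====
theorem name_parse_spec : Claim_equal_name_parse := by
  intro tt _ hpre
  exact name_parse_eq_alt tt hpre
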